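-- pv_equiv track=rewrite | github.com/mohithlingosme/Tradebot | data_collector/news_scraper.py | _map_article_to_symbols
-- ===== SOURCE A (Python) =====
-- from typing import Any, Dict, List, Optional, Sequence
--
-- def _map_article_to_symbols(
--     payload: Dict[str, Any], symbol_map: Dict[str, List[str]]
-- ) -> List[str]:
--     haystack = " ".join(
--         [
--             str(payload.get("title", "")),
--             str(payload.get("description", "")),
--             str(payload.get("content", "")),
--         ]
--     ).lower()
--
--     matched: List[str] = []
--     for symbol, aliases in symbol_map.items():
--         for alias in aliases:
--             if alias and alias.lower() in haystack:
--                 matched.append(symbol)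
--                 break
--     if not matched:
--         matched.append("MARKET")
--     return matched
-- ===== SOURCE B (Python) =====
-- from typing import Any, Dict, List
--
--
-- def _map_article_to_symbols(
--     payload: Dict[str, Any], symbol_map: Dict[str, List[str]]
-- ) -> List[str]:
--     haystack = " ".join(
--         [
--             str(payload.get("title", "")),
--             str(payload.get("description", "")),
--             str(payload.get("content", "")),
--         ]
--     ).lower()
--
--     # Group symbols by lowercased alias, so each distinct pattern is
--     # searched for in the text exactly once.
--     pairs = [
--         (alias.lower(), symbol)
--         for symbol, aliases in symbol_map.items()
--         for alias in aliases
--         if alias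
--     ]
--     index: Dict[str, List[str]] = {}
--     for pattern, symbol in pairs:
--         index.setdefault(pattern, []).append(symbol)
--
--     hits = set()
--     for pattern, symbols in index.items():
--         if pattern in haystack:
--             hits.update(symbols)
--
--     matched = [symbol for symbol in symbol_map if symbol in hits]
--     return matched or ["MARKET"]
-- ===== Notes on version B (the rewrite author's own statement) =====
-- stated objective: alternative
-- what changed: Instead of testing every alias of every symbol against the text with an inner break, B groups the symbols by distinct lowercased alias into a pattern->symbols index, runs one substring test per distinct pattern collecting a hit set, and finally filters the symbol-map keys by membership in that set.
import Mathlib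
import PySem

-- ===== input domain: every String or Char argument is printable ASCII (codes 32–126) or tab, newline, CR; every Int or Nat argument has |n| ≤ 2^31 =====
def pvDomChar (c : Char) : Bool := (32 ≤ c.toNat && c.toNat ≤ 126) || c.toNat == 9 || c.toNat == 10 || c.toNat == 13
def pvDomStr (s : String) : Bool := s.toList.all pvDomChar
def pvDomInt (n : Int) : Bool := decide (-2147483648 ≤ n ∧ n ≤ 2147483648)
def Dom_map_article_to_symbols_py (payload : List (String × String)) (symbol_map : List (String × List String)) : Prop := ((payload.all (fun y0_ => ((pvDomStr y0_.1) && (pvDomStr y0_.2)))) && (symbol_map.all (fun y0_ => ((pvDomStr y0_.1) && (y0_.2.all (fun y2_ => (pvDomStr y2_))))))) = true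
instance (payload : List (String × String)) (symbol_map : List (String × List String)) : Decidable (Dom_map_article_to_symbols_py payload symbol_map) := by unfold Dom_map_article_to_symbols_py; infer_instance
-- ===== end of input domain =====

-- B groups symbols by distinct lowercased alias (pattern -> symbols index), tests each
-- distinct pattern against the text once, and filters the keys by the hit set; objective: alternative.

-- ===== PORT A =====
-- the inner 'for alias in aliases: … break' loop of A
def pvAliasLoop (haystack : String) : List String → Bool
  | [] => false
  | a :: rest =>
    if (a != "") && PySem.Str.isIn (PySem.Str.lower a) haystack then true
    else pvAliasLoop haystack rest

def map_article_to_symbols_py (payload : List (String × String)) (symbol_map : List (String × List String)) : List String :=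
  let pd := PySem.Dict.ofList payload
  let haystack := PySem.Str.lower (PySem.Str.join " "
      [pd.getD "title" "", pd.getD "description" "", pd.getD "content" ""])
  let matched := (PySem.Dict.ofList symbol_map).items.foldl
      (fun acc p => if pvAliasLoop haystack p.2 then acc ++ [p.1] else acc) []
  if matched = [] then ["MARKET"] else matched

-- ===== PORT B =====
def map_article_to_symbols_py_alt (payload : List (String × String)) (symbol_map : List (String × List String)) : List String :=
  let pd := PySem.Dict.ofList payload
  let haystack := PySem.Str.lower (PySem.Str.join " "
      [pd.getD "title" "", pd.getD "description" "", pd.getD "content" ""])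
  let items := (PySem.Dict.ofList symbol_map).items
  -- pairs = [(alias.lower(), symbol) for symbol, aliases in symbol_map.items() for alias in aliases if alias]
  let pairs := items.flatMap (fun p => (p.2.filter (fun a => a != "")).map
      (fun a => (PySem.Str.lower a, p.1)))
  -- for pattern, symbol in pairs: index.setdefault(pattern, []).append(symbol)
  let index : PySem.Dict String (List String) :=
    pairs.foldl (fun d q => d.modify q.1 [] (fun l => l ++ [q.2])) PySem.Dict.empty
  -- for pattern, symbols in index.items(): if pattern in haystack: hits.update(symbols)
  let hits : PySem.Set String := index.items.foldl
      (fun hs pr => if PySem.Str.isIn pr.1 haystack then PySem.Set.update hs pr.2 else hs)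
      PySem.Set.empty
  let matched := ((PySem.Dict.ofList symbol_map).keys).filter (fun s => PySem.Set.contains hits s)
  if matched = [] then ["MARKET"] else matched

-- ===== PRECONDITION & SPEC =====
def Spec_map_article_to_symbols_py (payload : List (String × String)) (symbol_map : List (String × List String)) (out : List String) : Prop := out = map_article_to_symbols_py_alt payload symbol_map
instance (payload : List (String × String)) (symbol_map : List (String × List String)) (out : List String) : Decidable (Spec_map_article_to_symbols_py payload symbol_map out) := by unfold Spec_map_article_to_symbols_py; infer_instance

-- ===== CLAIM (what is proved, stated in full; the proofs are below) =====
def Claim_equal_map_article_to_symbols_py : Prop := ∀ (payload : List (String × String)) (symbol_map : List (String × List String)), Dom_map_article_to_symbols_py payload symbol_map → Spec_map_article_to_symbols_py payload symbol_map (map_article_to_symbols_py payload symbol_map)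

-- ===== LEMMAS AND PROOFS =====

-- A's break loop is an 'any'
theorem pvAliasLoop_iff (h : String) (l : List String) :
    pvAliasLoop h l = true ↔ ∃ a ∈ l, (a != "") && PySem.Str.isIn (PySem.Str.lower a) h := by
  induction l with
  | nil => simp [pvAliasLoop]
  | cons a rest ih =>
    simp only [pvAliasLoop]
    split_ifs with hc
    · constructor
      · intro _; exact ⟨a, List.mem_cons_self, hc⟩
      · intro _; rfl
    · rw [ih]
      constructor
      · rintro ⟨x, hx, hp⟩; exact ⟨x, List.mem_cons_of_mem _ hx, hp⟩
      · rintro ⟨x, hx, hp⟩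
        rcases List.mem_cons.mp hx with hm | hm
        · subst hm; exact absurd hp hc
        · exact ⟨x, hm, hp⟩

-- membership in Set.update
theorem mem_set_update (hs : PySem.Set String) (xs : List String) (s : String) :
    s ∈ PySem.Set.update hs xs ↔ s ∈ hs ∨ s ∈ xs := by
  induction xs generalizing hs with
  | nil => simp [PySem.Set.update]
  | cons x rest ih =>
    have h : PySem.Set.update hs (x :: rest) = PySem.Set.update (PySem.Set.add hs x) rest := rfl
    rw [h, ih, PySem.Set.mem_add]
    simp only [List.mem_cons]
    tauto

-- membership after the hit-collecting fold over the index items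
theorem mem_hits_fold (haystack : String) (l : List (String × List String))
    (init : PySem.Set String) (s : String) :
    (s ∈ l.foldl (fun hs pr => if PySem.Str.isIn pr.1 haystack then PySem.Set.update hs pr.2 else hs) init)
      ↔ s ∈ init ∨ ∃ pr ∈ l, PySem.Str.isIn pr.1 haystack = true ∧ s ∈ pr.2 := by
  induction l generalizing init with
  | nil => simp
  | cons pr rest ih =>
    rw [List.foldl_cons, ih]
    split_ifs with hc
    · rw [mem_set_update]
      simp only [List.mem_cons]
      constructor
      · rintro ((hi | hi) | ⟨q, hq, h1, h2⟩)
        · exact Or.inl hi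
        · exact Or.inr ⟨pr, Or.inl rfl, hc, hi⟩
        · exact Or.inr ⟨q, Or.inr hq, h1, h2⟩
      · rintro (hi | ⟨q, hq | hq, h1, h2⟩)
        · exact Or.inl (Or.inl hi)
        · subst hq; exact Or.inl (Or.inr h2)
        · exact Or.inr ⟨q, hq, h1, h2⟩
    · simp only [List.mem_cons]
      constructor
      · rintro (hi | ⟨q, hq, h1, h2⟩)
        · exact Or.inl hi
        · exact Or.inr ⟨q, Or.inr hq, h1, h2⟩
      · rintro (hi | ⟨q, hq | hq, h1, h2⟩)
        · exact Or.inl hi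
        · subst hq; exact absurd h1 (by simp_all)
        · exact Or.inr ⟨q, hq, h1, h2⟩

-- the central pointwise fact: a symbol-map key is in B's hit set iff A's alias loop fires
theorem contains_hits_eq (haystack : String) (items : List (String × List String))
    (hnd : (items.map Prod.fst).Nodup) (p : String × List String) (hp : p ∈ items) :
    PySem.Set.contains
      (((items.flatMap (fun r => (r.2.filter (fun a => a != "")).map
            (fun a => (PySem.Str.lower a, r.1)))).foldl
          (fun d q => d.modify q.1 [] (fun l => l ++ [q.2])) PySem.Dict.empty).items.foldl
        (fun hs pr => if PySem.Str.isIn pr.1 haystack then PySem.Set.update hs pr.2 else hs)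
        PySem.Set.empty) p.1
      = pvAliasLoop haystack p.2 := by
  set pairs := items.flatMap (fun r => (r.2.filter (fun a => a != "")).map
      (fun a => (PySem.Str.lower a, r.1))) with hpairs
  set index := pairs.foldl (fun d q => d.modify q.1 [] (fun l => l ++ [q.2])) PySem.Dict.empty with hindex
  have hknd : index.keys.Nodup := by
    rw [hindex]
    exact PySem.Dict.nodup_keys_foldl_modify_key pairs Prod.fst [] _ PySem.Dict.empty
      (by simp [PySem.Dict.keys_empty])
  have hgetD : ∀ k s : String, s ∈ index.getD k [] ↔ ∃ q ∈ pairs, q.1 = k ∧ q.2 = s := by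
    intro k s
    rw [hindex, PySem.Dict.getD_foldl_modify_append, PySem.Dict.getD_empty, List.nil_append,
      List.mem_map]
    constructor
    · rintro ⟨q, hq, hqs⟩
      rw [List.mem_filter] at hq
      exact ⟨q, hq.1, by simpa using hq.2, hqs⟩
    · rintro ⟨q, hq, hk1, hs1⟩
      exact ⟨q, List.mem_filter.mpr ⟨hq, by simpa using hk1⟩, hs1⟩
  rcases Bool.eq_false_or_eq_true (pvAliasLoop haystack p.2) with hb | hb <;> rw [hb]
  · -- loop fired: p.1 is collected via the pattern (lower a)
    rw [pvAliasLoop_iff] at hb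
    rcases hb with ⟨a, ha, hcond⟩
    rw [Bool.and_eq_true] at hcond
    rcases hcond with ⟨hne, hin⟩
    have hqmem : (PySem.Str.lower a, p.1) ∈ pairs := by
      rw [hpairs, List.mem_flatMap]
      exact ⟨p, hp, List.mem_map.mpr ⟨a, List.mem_filter.mpr ⟨ha, hne⟩, rfl⟩⟩
    have hkmem : PySem.Str.lower a ∈ index.keys := by
      rw [hindex, PySem.Dict.keys_foldl_modify_key, mem_set_update]
      exact Or.inr (List.mem_map.mpr ⟨_, hqmem, rfl⟩)
    rw [PySem.Set.contains_iff, mem_hits_fold]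
    right
    refine ⟨(PySem.Str.lower a, index.getD (PySem.Str.lower a) []), ?_, hin, ?_⟩
    · rw [PySem.Dict.items_eq_map_keys index hknd []]
      exact List.mem_map.mpr ⟨_, hkmem, rfl⟩
    · exact (hgetD _ _).mpr ⟨_, hqmem, rfl, rfl⟩
  · -- loop did not fire: p.1 cannot be in the hit set
    rw [← Bool.not_eq_true, PySem.Set.contains_iff, mem_hits_fold]
    rintro (hi | ⟨pr, hpr, hisin, hmem⟩)
    · simp [PySem.Set.empty] at hi
    · obtain ⟨k, v⟩ := pr
      have hv : index.getD k [] = v :=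
        PySem.Dict.getD_of_mem_items _ hpr hknd []
      rw [← hv] at hmem
      rcases (hgetD _ _).mp hmem with ⟨q, hq, hq1, hq2⟩
      rw [hpairs, List.mem_flatMap] at hq
      rcases hq with ⟨r, hr, hq⟩
      rw [List.mem_map] at hq
      rcases hq with ⟨a, ha, hqa⟩
      rw [List.mem_filter] at ha
      have hr1 : r.1 = p.1 := by rw [← hqa] at hq2; exact hq2
      have hrp : r = p := List.inj_on_of_nodup_map hnd hr hp hr1
      have hT : pvAliasLoop haystack r.2 = true := by
        rw [pvAliasLoop_iff]
        refine ⟨a, ha.1, ?_⟩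
        rw [Bool.and_eq_true]
        refine ⟨ha.2, ?_⟩
        have : PySem.Str.lower a = k := by rw [← hqa] at hq1; exact hq1
        rw [this]; exact hisin
      rw [hrp] at hT
      simp [hb] at hT

-- ===== VERDICT (by name: the statement is the Claim_ definition above) =====
theorem map_article_to_symbols_py_spec : Claim_equal_map_article_to_symbols_py := by
  intro payload symbol_map _
  unfold Spec_map_article_to_symbols_py map_article_to_symbols_py map_article_to_symbols_py_alt
  simp only []
  set pd := PySem.Dict.ofList payload with hpd
  set haystack := PySem.Str.lower (PySem.Str.join " "
      [pd.getD "title" "", pd.getD "description" "", pd.getD "content" ""]) with hhay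
  set items := (PySem.Dict.ofList symbol_map).items with hitems
  have hnd : (items.map Prod.fst).Nodup := PySem.Dict.nodup_keys_ofList symbol_map
  rw [PySem.List.foldl_append_if (p := fun p => pvAliasLoop haystack p.2) (f := Prod.fst)]
  have hkeys : (PySem.Dict.ofList symbol_map).keys = items.map Prod.fst := rfl
  rw [hkeys, List.filter_map]
  rw [List.nil_append]
  have hfc : items.filter (fun p => pvAliasLoop haystack p.2)
      = items.filter ((fun s => PySem.Set.contains
          (((items.flatMap (fun r => (r.2.filter (fun a => a != "")).map
                (fun a => (PySem.Str.lower a, r.1)))).foldl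
              (fun d q => d.modify q.1 [] (fun l => l ++ [q.2])) PySem.Dict.empty).items.foldl
            (fun hs pr => if PySem.Str.isIn pr.1 haystack then PySem.Set.update hs pr.2 else hs)
            PySem.Set.empty) s) ∘ Prod.fst) := by
    apply List.filter_congr
    intro p hp
    simp only [Function.comp_apply]
    exact (contains_hits_eq haystack items hnd p hp).symm
  rw [hfc]
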